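-- pv_equiv track=rewrite | github.com/olaDmenace/solTrader | database_schema_validator.py | _column_types_compatible
-- ===== SOURCE A (Python) =====
-- def _column_types_compatible(expected: str, actual: str) -> bool:
--     """Check if column types are compatible"""
--     # Normalize both definitions
--     expected_lower = expected.lower()
--     actual_lower = actual.lower()
--
--     # Extract base types
--     expected_type = expected_lower.split()[0]
--     actual_type = actual_lower.split()[0]
--
--     # SQLite type compatibility
--     type_compatibility = {
--         'integer': ['integer', 'int'],
--         'text': ['text', 'varchar', 'char'],
--         'real': ['real', 'float', 'double'],
--         'blob': ['blob'],
--     }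
--
--     for base_type, compatible_types in type_compatibility.items():
--         if expected_type in compatible_types and actual_type in compatible_types:
--             return True
--
--     return expected_type == actual_type
-- ===== SOURCE B (Python) =====
-- # Compatible distinct type-name pairs: the pairwise closure of SQLite's alias
-- # groups, stored as unordered frozenset pairs.
-- _COMPAT_PAIRS = {
--     frozenset(p) for p in (
--         ('integer', 'int'),
--         ('text', 'varchar'), ('text', 'char'), ('varchar', 'char'),
--         ('real', 'float'), ('real', 'double'), ('float', 'double'),
--     )
-- }
--
-- def _column_types_compatible(expected: str, actual: str) -> bool:
--     expected_type = expected.lower().split()[0]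
--     actual_type = actual.lower().split()[0]
--     return expected_type == actual_type or frozenset((expected_type, actual_type)) in _COMPAT_PAIRS
-- ===== Notes on version B (the rewrite author's own statement) =====
-- stated objective: alternative
-- what changed: Replaced the scan over alias groups (membership of both tokens in one group) by an equality short-circuit plus a lookup of the unordered token pair in a precomputed set of compatible distinct pairs (the pairwise closure of the groups), with no group or canonical-name structure at runtime.
import Mathlib
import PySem

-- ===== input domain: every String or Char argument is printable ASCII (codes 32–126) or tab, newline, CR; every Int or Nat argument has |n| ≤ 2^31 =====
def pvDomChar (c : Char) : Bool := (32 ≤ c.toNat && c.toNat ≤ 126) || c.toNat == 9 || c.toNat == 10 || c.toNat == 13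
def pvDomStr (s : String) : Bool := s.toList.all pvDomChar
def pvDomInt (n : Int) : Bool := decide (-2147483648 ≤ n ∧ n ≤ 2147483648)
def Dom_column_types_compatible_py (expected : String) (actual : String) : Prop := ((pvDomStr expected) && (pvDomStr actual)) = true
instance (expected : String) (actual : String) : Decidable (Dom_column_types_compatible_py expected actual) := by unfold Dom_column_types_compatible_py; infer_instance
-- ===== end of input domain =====

-- B replaces A's scan over alias groups by an equality short-circuit plus a lookup of the
-- unordered token pair in a precomputed set of compatible distinct pairs (alternative).
-- ===== PORT A =====
-- the dict literal type_compatibility, in insertion order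
def pvTypeCompat : List (String × List String) :=
  [("integer", ["integer", "int"]),
   ("text", ["text", "varchar", "char"]),
   ("real", ["real", "float", "double"]),
   ("blob", ["blob"])]

-- the 'for base_type, compatible_types in type_compatibility.items()' loop, then the final return
def pvALoop (items : List (String × List String)) (et at_ : String) : Bool :=
  match items with
  | [] => et == at_
  | (_, comp) :: rest =>
      if comp.contains et && comp.contains at_ then true else pvALoop rest et at_

def column_types_compatible_py (expected : String) (actual : String) : Bool :=
  let expectedLower := PySem.Str.lower expected
  let actualLower := PySem.Str.lower actual
  match PySem.List.pyGet? (PySem.Str.split₀ expectedLower) 0,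
        PySem.List.pyGet? (PySem.Str.split₀ actualLower) 0 with
  | some et, some at_ => pvALoop pvTypeCompat et at_
  | _, _ => false  -- IndexError in Python; excluded by Pre_

-- ===== PORT B =====
-- _COMPAT_PAIRS: unordered pairs of compatible distinct type names (each frozenset
-- represented by one (p,q) entry; membership tests both orientations below)
def pvCompatPairs : List (String × String) :=
  [("integer", "int"),
   ("text", "varchar"), ("text", "char"), ("varchar", "char"),
   ("real", "float"), ("real", "double"), ("float", "double")]

-- 'frozenset((et, at)) in _COMPAT_PAIRS' (et ≠ at here): the unordered pair matches an entry
def pvPairMem (et at_ : String) : Bool :=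
  pvCompatPairs.any (fun p => (p.1 == et && p.2 == at_) || (p.1 == at_ && p.2 == et))

def column_types_compatible_py_alt (expected : String) (actual : String) : Bool :=
  -- none (= IndexError in Python) is excluded by Pre_
  (((PySem.List.pyGet? (PySem.Str.split₀ (PySem.Str.lower expected)) 0).bind
      (fun et => (PySem.List.pyGet? (PySem.Str.split₀ (PySem.Str.lower actual)) 0).map
        (fun at_ => et == at_ || pvPairMem et at_)))).getD false

-- ===== PRECONDITION & SPEC =====
-- Pre_ excludes exactly the inputs where either string has no non-whitespace character,
-- on which A (and B) raise IndexError at split()[0].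
def Pre_column_types_compatible_py (expected : String) (actual : String) : Prop :=
  PySem.Str.split₀ (PySem.Str.lower expected) ≠ [] ∧ PySem.Str.split₀ (PySem.Str.lower actual) ≠ []
instance (expected : String) (actual : String) : Decidable (Pre_column_types_compatible_py expected actual) := by unfold Pre_column_types_compatible_py; infer_instance

def pvWitness_column_types_compatible_py : String × String := ("INTEGER PRIMARY KEY", "int")

def Spec_column_types_compatible_py (expected : String) (actual : String) (out : Bool) : Prop := out = column_types_compatible_py_alt expected actual
instance (expected : String) (actual : String) (out : Bool) : Decidable (Spec_column_types_compatible_py expected actual out) := by unfold Spec_column_types_compatible_py; infer_instance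

-- ===== CLAIM (what is proved, stated in full; the proofs are below) =====
def Claim_equal_column_types_compatible_py : Prop := ∀ (expected : String) (actual : String), Dom_column_types_compatible_py expected actual → Pre_column_types_compatible_py expected actual → Spec_column_types_compatible_py expected actual (column_types_compatible_py expected actual)

-- ===== LEMMAS AND PROOFS =====
def pvAliases : List String :=
  ["integer", "int", "text", "varchar", "char", "real", "float", "double", "blob"]

-- core: A's group loop equals B's equality-or-pair-membership test, for arbitrary tokens
theorem pvCore (et at_ : String) :
    pvALoop pvTypeCompat et at_ = (et == at_ || pvPairMem et at_) := by
  by_cases h1 : et ∈ pvAliases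
  · simp only [pvAliases, List.mem_cons, List.not_mem_nil, or_false] at h1
    rcases h1 with rfl | rfl | rfl | rfl | rfl | rfl | rfl | rfl | rfl <;>
    · by_cases h2 : at_ ∈ pvAliases
      · simp only [pvAliases, List.mem_cons, List.not_mem_nil, or_false] at h2
        rcases h2 with rfl | rfl | rfl | rfl | rfl | rfl | rfl | rfl | rfl <;> decide
      · simp only [pvAliases, List.mem_cons, List.not_mem_nil, or_false, not_or] at h2
        obtain ⟨n1, n2, n3, n4, n5, n6, n7, n8, n9⟩ := h2
        simp [pvALoop, pvTypeCompat, pvPairMem, pvCompatPairs,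
              n1, n2, n3, n4, n5, n6, n7, n8, n9,
              Ne.symm n1, Ne.symm n2, Ne.symm n3, Ne.symm n4, Ne.symm n5, Ne.symm n6, Ne.symm n7, Ne.symm n8]
  · simp only [pvAliases, List.mem_cons, List.not_mem_nil, or_false, not_or] at h1
    obtain ⟨m1, m2, m3, m4, m5, m6, m7, m8, m9⟩ := h1
    simp [pvALoop, pvTypeCompat, pvPairMem, pvCompatPairs,
          m1, m2, m3, m4, m5, m6, m7, m8, m9,
          Ne.symm m1, Ne.symm m2, Ne.symm m3, Ne.symm m4, Ne.symm m5, Ne.symm m6, Ne.symm m7, Ne.symm m8]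

-- ===== VERDICT (by name: the statement is the Claim_ definition above) =====
theorem column_types_compatible_py_spec : Claim_equal_column_types_compatible_py := by
  intro expected actual _hdom hpre
  obtain ⟨h1, h2⟩ := hpre
  unfold Spec_column_types_compatible_py column_types_compatible_py column_types_compatible_py_alt
  obtain ⟨et, ets, he⟩ := List.exists_cons_of_ne_nil h1
  obtain ⟨at_, ats, ha⟩ := List.exists_cons_of_ne_nil h2
  simp only [he, ha, PySem.List.pyGet?_zero_cons, Option.map_some, Option.bind_some,
             Option.getD_some]
  exact pvCore et at_
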